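-- pv_equiv track=rewrite | github.com/necrobuffalo/aoc | 2019/day4.py | has_only_two_matching_digits
-- ===== SOURCE A (Python) =====
-- def has_only_two_matching_digits(s: str) -> bool:
--     for i in range(len(s)-1):
--         if s[i] == s[i+1]:
--             if i > 0 and s[i-1] == s[i]:
--                 # prior digit also matches, throw it out
--                 pass
--             elif i < len(s)-2 and s[i+2] == s[i]:
--                 # digit after also matches, throw it out
--                 pass
--             else:
--                 return True
--     return False
-- ===== SOURCE B (Python) =====
-- def has_only_two_matching_digits(s: str) -> bool:
--     # single run-length scan: track the current run; a maximal run of exactly 2 => True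
--     count = 0
--     prev = None
--     for ch in s:
--         if ch == prev:
--             count += 1
--         else:
--             if count == 2:
--                 return True
--             count = 1
--             prev = ch
--     return count == 2
-- ===== Notes on version B (the rewrite author's own statement) =====
-- stated objective: simpler
-- what changed: Replaces A's index-offset neighbour comparisons (s[i-1], s[i], s[i+1], s[i+2] with boundary guards) by a single run-length scan tracking the current run's character and length, returning True when a maximal run closes at exactly 2.
import Mathlib
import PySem

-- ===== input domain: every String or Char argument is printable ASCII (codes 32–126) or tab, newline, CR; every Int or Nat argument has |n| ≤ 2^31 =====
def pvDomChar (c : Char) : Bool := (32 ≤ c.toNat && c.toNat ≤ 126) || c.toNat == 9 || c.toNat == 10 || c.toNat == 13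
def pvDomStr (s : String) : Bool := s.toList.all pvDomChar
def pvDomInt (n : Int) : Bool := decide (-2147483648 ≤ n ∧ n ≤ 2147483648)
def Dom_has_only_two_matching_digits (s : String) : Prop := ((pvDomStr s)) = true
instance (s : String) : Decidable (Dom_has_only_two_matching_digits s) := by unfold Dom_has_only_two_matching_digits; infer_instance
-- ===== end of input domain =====

-- B replaces A's index-offset neighbour comparisons by a single run-length scan
-- (track the current run's character and length; a maximal run of exactly 2 gives True);
-- objective: simpler/idiomatic, same O(n) cost.

-- ===== PORT A =====
-- A: for i in range(len(s)-1): if s[i]==s[i+1]: (pass if i>0 and s[i-1]==s[i];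
--    pass if i<len(s)-2 and s[i+2]==s[i]; else return True); return False
-- (the loop's early 'return True' is List.any over the same range; every indexing
--  whose guard holds is in range, so the total pyGetD is exact here)
def has_only_two_matching_digits (s : String) : Bool :=
  (PySem.List.pyRange 0 ((s.toList.length : Int) - 1) 1).any (fun i =>
    (PySem.List.pyGetD s.toList i 'a' == PySem.List.pyGetD s.toList (i + 1) 'a')
    && !((decide (0 < i)) && (PySem.List.pyGetD s.toList (i - 1) 'a' == PySem.List.pyGetD s.toList i 'a'))
    && !((decide (i < (s.toList.length : Int) - 2)) && (PySem.List.pyGetD s.toList (i + 2) 'a' == PySem.List.pyGetD s.toList i 'a')))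

-- ===== PORT B =====
-- B's loop: state (prev, count), early return when a run closes at length exactly 2
def pvBLoop (prev : Option Char) (count : Nat) : List Char → Bool
  | [] => count == 2
  | ch :: rest =>
    if some ch == prev then pvBLoop prev (count + 1) rest
    else if count == 2 then true
    else pvBLoop (some ch) 1 rest

def has_only_two_matching_digits_alt (s : String) : Bool :=
  pvBLoop none 0 s.toList

-- ===== PRECONDITION & SPEC =====
def Spec_has_only_two_matching_digits (s : String) (out : Bool) : Prop := out = has_only_two_matching_digits_alt s
instance (s : String) (out : Bool) : Decidable (Spec_has_only_two_matching_digits s out) := by unfold Spec_has_only_two_matching_digits; infer_instance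

-- ===== CLAIM (what is proved, stated in full; the proofs are below) =====
def Claim_equal_has_only_two_matching_digits : Prop := ∀ (s : String), Dom_has_only_two_matching_digits s → Spec_has_only_two_matching_digits s (has_only_two_matching_digits s)

-- ===== LEMMAS AND PROOFS =====

-- A's per-index condition over Nat indices, the character preceding the list abstracted as p
def pvPrev (p : Option Char) (cs : List Char) (j : Nat) : Bool :=
  if j = 0 then (match p with | none => false | some c => c == cs.getD 0 'a')
  else cs.getD (j - 1) 'a' == cs.getD j 'a'

def pvCondA (p : Option Char) (cs : List Char) (j : Nat) : Bool :=
  (cs.getD j 'a' == cs.getD (j + 1) 'a')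
  && !(pvPrev p cs j)
  && !((decide (j < cs.length - 2)) && (cs.getD (j + 2) 'a' == cs.getD j 'a'))

def pvIdxAny (p : Option Char) (cs : List Char) : Bool :=
  (List.range (cs.length - 1)).any (pvCondA p cs)

-- number of leading copies of c
def pvLead (c : Char) : List Char → Nat
  | [] => 0
  | x :: xs => if x = c then pvLead c xs + 1 else 0

-- run-length decomposition continuing a pending run (c, k)
def pvRunsCont (c : Char) (k : Nat) : List Char → List (Char × Nat)
  | [] => [(c, k)]
  | x :: xs => if x = c then pvRunsCont c (k + 1) xs else (c, k) :: pvRunsCont x 1 xs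

-- runs of cs after skipping any leading run matching p
def pvRunsFrom (p : Option Char) : List Char → List (Char × Nat)
  | [] => []
  | x :: xs => if p = some x then pvRunsFrom p xs else pvRunsCont x 1 xs

def pvP (r : Char × Nat) : Bool := r.2 == 2

-- equation lemmas (rfl)
theorem pvLead_cons (c x : Char) (xs : List Char) :
    pvLead c (x :: xs) = if x = c then pvLead c xs + 1 else 0 := rfl
theorem pvRunsCont_cons (c : Char) (k : Nat) (x : Char) (xs : List Char) :
    pvRunsCont c k (x :: xs) = if x = c then pvRunsCont c (k + 1) xs else (c, k) :: pvRunsCont x 1 xs := rfl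
theorem pvRunsFrom_cons (p : Option Char) (x : Char) (xs : List Char) :
    pvRunsFrom p (x :: xs) = if p = some x then pvRunsFrom p xs else pvRunsCont x 1 xs := rfl
theorem pvBLoop_cons (p : Option Char) (k : Nat) (x : Char) (xs : List Char) :
    pvBLoop p k (x :: xs) = if some x == p then pvBLoop p (k + 1) xs
      else if k == 2 then true else pvBLoop (some x) 1 xs := rfl

theorem pvBeq12 (l : Nat) : (1 + l == 2) = (l == 1) := by
  rcases eq_or_ne l 1 with h | h
  · subst h; rfl
  · rw [beq_eq_false_iff_ne.mpr (by omega), beq_eq_false_iff_ne.mpr h]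

-- bridge: port A equals the Nat-indexed scan with no previous character
theorem pvBridgeA (s : String) :
    has_only_two_matching_digits s = pvIdxAny none s.toList := by
  unfold has_only_two_matching_digits pvIdxAny
  rw [PySem.List.pyRange_one, List.any_map]
  have hlen : ((s.toList.length : Int) - 1 - 0).toNat = s.toList.length - 1 := by omega
  rw [hlen]
  congr 1
  funext k
  show ((PySem.List.pyGetD s.toList (0 + (k:Int)) 'a' == PySem.List.pyGetD s.toList (0 + (k:Int) + 1) 'a')
    && !((decide (0 < 0 + (k:Int))) && (PySem.List.pyGetD s.toList (0 + (k:Int) - 1) 'a' == PySem.List.pyGetD s.toList (0 + (k:Int)) 'a'))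
    && !((decide (0 + (k:Int) < (s.toList.length : Int) - 2)) && (PySem.List.pyGetD s.toList (0 + (k:Int) + 2) 'a' == PySem.List.pyGetD s.toList (0 + (k:Int)) 'a')))
    = pvCondA none s.toList k
  have e1 : (0 : Int) + (k:Int) = ((k : Nat) : Int) := by omega
  have e2 : (0 : Int) + (k:Int) + 1 = ((k + 1 : Nat) : Int) := by push_cast; ring
  have e3 : (0 : Int) + (k:Int) + 2 = ((k + 2 : Nat) : Int) := by push_cast; ring
  have d1 : decide ((0:Int) + (k:Int) < (s.toList.length : Int) - 2) = decide (k < s.toList.length - 2) :=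
    decide_eq_decide.mpr (by omega)
  have d2 : decide ((0:Int) < 0 + (k:Int)) = decide (0 < k) := decide_eq_decide.mpr (by omega)
  rw [d1, d2, e2, e3, e1, PySem.List.pyGetD_natCast, PySem.List.pyGetD_natCast, PySem.List.pyGetD_natCast]
  unfold pvCondA pvPrev
  cases k with
  | zero => simp
  | succ m =>
    have e4 : ((m + 1 : Nat) : Int) - 1 = ((m : Nat) : Int) := by push_cast; ring
    rw [e4, PySem.List.pyGetD_natCast]
    simp

-- shifting the scan by one character
theorem pvCondA_shift (p : Option Char) (x : Char) (cs : List Char) (j : Nat) :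
    pvCondA p (x :: cs) (j + 1) = pvCondA (some x) cs j := by
  have hb : decide (j + 1 < (x :: cs).length - 2) = decide (j < cs.length - 2) :=
    decide_eq_decide.mpr (by simp only [List.length_cons]; omega)
  have g1 : (x :: cs).getD (j + 1) 'a' = cs.getD j 'a' := rfl
  have g2 : (x :: cs).getD (j + 2) 'a' = cs.getD (j + 1) 'a' := rfl
  have g3 : (x :: cs).getD (j + 3) 'a' = cs.getD (j + 2) 'a' := rfl
  have hp : pvPrev p (x :: cs) (j + 1) = pvPrev (some x) cs j := by
    unfold pvPrev
    cases j with
    | zero => simp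
    | succ m => simp
  unfold pvCondA
  rw [show j + 1 + 1 = j + 2 from rfl, show j + 1 + 2 = j + 3 from rfl, g1, g2, g3, hp, hb]

theorem pvIdxAny_cons (p : Option Char) (x : Char) (cs : List Char) (h : cs ≠ []) :
    pvIdxAny p (x :: cs) = (pvCondA p (x :: cs) 0 || pvIdxAny (some x) cs) := by
  unfold pvIdxAny
  have hl : (x :: cs).length - 1 = (cs.length - 1) + 1 := by
    have := List.length_pos_of_ne_nil h
    simp only [List.length_cons]; omega
  rw [hl, List.range_succ_eq_map, List.any_cons, List.any_map]
  congr 1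
  have hf : (pvCondA p (x :: cs)) ∘ Nat.succ = pvCondA (some x) cs :=
    funext (fun j => pvCondA_shift p x cs j)
  rw [hf]

-- the index-0 condition says exactly "the leading run of x in x::cs has length 2"
theorem pvCondA_zero (p : Option Char) (x : Char) (cs : List Char) (hp : p ≠ some x)
    (h : cs ≠ []) : pvCondA p (x :: cs) 0 = (pvLead x cs == 1) := by
  have hprev : pvPrev p (x :: cs) 0 = false := by
    unfold pvPrev
    cases p with
    | none => simp
    | some c =>
      have hcx : ¬ c = x := fun hc => hp (by rw [hc])
      simp [hcx]
  cases cs with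
  | nil => exact absurd rfl h
  | cons y ys =>
    cases ys with
    | nil =>
      unfold pvCondA
      rw [hprev]
      by_cases hxy : x = y
      · simp [pvLead, hxy]
      · have hyx : ¬ y = x := fun hq => hxy hq.symm
        simp [pvLead, hxy, hyx]
    | cons z zs =>
      unfold pvCondA
      rw [hprev]
      have hb2 : decide (0 < (x :: y :: z :: zs).length - 2) = true := by simp
      have hg0 : (x :: y :: z :: zs).getD 0 'a' = x := rfl
      have hg1 : (x :: y :: z :: zs).getD (0 + 1) 'a' = y := rfl
      have hg2 : (x :: y :: z :: zs).getD (0 + 2) 'a' = z := rfl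
      rw [hb2, hg0, hg1, hg2]
      by_cases hxy : x = y
      · by_cases hzx : z = x
        · have hv : pvLead x (y :: z :: zs) = pvLead x zs + 2 := by
            simp [pvLead, hxy.symm, hzx]
          have hl : (pvLead x (y :: z :: zs) == 1) = false := by
            rw [hv]; exact beq_eq_false_iff_ne.mpr (by omega)
          rw [hl]
          simp [hzx]
        · have hv : pvLead x (y :: z :: zs) = 1 := by
            simp [pvLead, hxy.symm, hzx]
          rw [hv]
          simp [hxy]
          exact fun hq => hzx (hq.trans hxy.symm)
      · have hyx : ¬ y = x := fun hq => hxy hq.symm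
        have hv : pvLead x (y :: z :: zs) = 0 := by simp [pvLead, hyx]
        rw [hv]
        simp [hxy]

-- any-run-of-2 in a continued run, split into pending-run part and the rest
theorem pvRunsCont_any (cs : List Char) (c : Char) (k : Nat) :
    (pvRunsCont c k cs).any pvP
      = ((k + pvLead c cs == 2) || (pvRunsFrom (some c) cs).any pvP) := by
  induction cs generalizing c k with
  | nil => simp [pvRunsCont, pvRunsFrom, pvLead, pvP]
  | cons x xs ih =>
    by_cases hx : x = c
    · rw [pvRunsCont_cons, if_pos hx, pvLead_cons, if_pos hx,
        pvRunsFrom_cons, if_pos (by rw [hx]), ih]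
      have h2 : k + 1 + pvLead c xs = k + (pvLead c xs + 1) := by omega
      rw [h2]
    · have hps : ¬ (some c = some x) := by intro hq; exact hx (Option.some.inj hq).symm
      rw [pvRunsCont_cons, if_neg hx, pvLead_cons, if_neg hx,
        pvRunsFrom_cons, if_neg hps, List.any_cons, ih]
      have hp0 : pvP (c, k) = (k == 2) := rfl
      rw [hp0]
      cases hk2 : (k == 2) <;> simp [hk2]

-- A-side characterization
theorem pvIdxAny_eq (cs : List Char) (p : Option Char) :
    pvIdxAny p cs = (pvRunsFrom p cs).any pvP := by
  induction cs generalizing p with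
  | nil => simp [pvIdxAny, pvRunsFrom]
  | cons x xs ih =>
    cases hxs : xs with
    | nil =>
      have h1 : pvIdxAny p [x] = false := by simp [pvIdxAny]
      rw [h1, pvRunsFrom_cons]
      by_cases hp : p = some x
      · simp [hp, pvRunsFrom]
      · simp [hp, pvRunsCont, pvP]
    | cons y ys =>
      rw [← hxs]
      have hne : xs ≠ [] := by rw [hxs]; exact List.cons_ne_nil y ys
      rw [pvIdxAny_cons p x xs hne, ih, pvRunsFrom_cons]
      by_cases hp : p = some x
      · subst hp
        have h0 : pvCondA (some x) (x :: xs) 0 = false := by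
          unfold pvCondA pvPrev
          simp
        rw [h0, if_pos rfl]
        simp
      · rw [pvCondA_zero p x xs hp hne, if_neg hp, pvRunsCont_any, pvBeq12]

-- B-side characterization
theorem pvBLoop_eq (cs : List Char) (c : Char) (k : Nat) :
    pvBLoop (some c) k cs = ((k + pvLead c cs == 2) || (pvRunsFrom (some c) cs).any pvP) := by
  induction cs generalizing c k with
  | nil => simp [pvBLoop, pvLead, pvRunsFrom]
  | cons x xs ih =>
    by_cases hx : x = c
    · rw [pvBLoop_cons, if_pos (by simp [hx]), ih, pvLead_cons, if_pos hx,
        pvRunsFrom_cons, if_pos (by rw [hx])]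
      rw [show k + 1 + pvLead c xs = k + (pvLead c xs + 1) from by omega]
    · have hps : ¬ ((some x == some c) = true) := by simp [hx]
      have hps' : ¬ (some c = some x) := fun hq => hx (Option.some.inj hq).symm
      rw [pvBLoop_cons, if_neg hps, pvLead_cons, if_neg hx,
        pvRunsFrom_cons, if_neg hps', pvRunsCont_any, pvBeq12]
      cases hk2 : (k == 2)
      · rw [if_neg (by simp [hk2]), ih, pvBeq12]
        have hz : (k + 0 == 2) = false := by simpa using hk2
        simp [hz]
      · rw [if_pos rfl]
        have hz : (k + 0 == 2) = true := by simpa using hk2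
        simp [hz]

theorem pvMain (cs : List Char) : pvIdxAny none cs = pvBLoop none 0 cs := by
  cases cs with
  | nil => simp [pvIdxAny, pvBLoop]
  | cons x xs =>
    have hb : pvBLoop none 0 (x :: xs) = pvBLoop (some x) 1 xs := by
      rw [pvBLoop_cons]; rfl
    rw [hb, pvBLoop_eq, pvIdxAny_eq, pvRunsFrom_cons,
      if_neg (by simp), pvRunsCont_any]

-- ===== VERDICT (by name: the statement is the Claim_ definition above) =====
theorem has_only_two_matching_digits_spec : Claim_equal_has_only_two_matching_digits := by
  intro s _
  unfold Spec_has_only_two_matching_digits has_only_two_matching_digits_alt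
  rw [pvBridgeA, pvMain]
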